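-- pv_equiv track=rewrite | github.com/xingzz111/One-Click_NRF-Flash-Tool | oneClickTool/mix/lynx/script/sequence/parse_fpga.py | str_2_int
-- ===== SOURCE A (Python) =====
-- def str_2_int(string, endian='be'):
--     '''
--     Convert string to int. le for little-endian, be for big-endian
--     bit file defaults to have big-endian.
--     '''
--     ret = 0
--     if endian == 'le':
--         string = reversed(string)
--     elif endian == 'be':
--         pass
--     else:
--         raise Exception('Unexpected endian{}; either le or be.'.format(endian))
--     for i in string:
--         ret = ret << 8
--         ret += ord(i)
--
--     return ret
-- ===== SOURCE B (Python) =====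
-- def str_2_int(string, endian='be'):
--     '''
--     Convert string to int. le for little-endian, be for be big-endian.
--     Positional weighting: each char contributes ord(c) << (8 * position-from-the-right).
--     '''
--     if endian == 'le':
--         seq = list(reversed(string))
--     elif endian == 'be':
--         seq = list(string)
--     else:
--         raise Exception('Unexpected endian{}; either le or be.'.format(endian))
--     n = len(seq)
--     return sum(ord(c) << (8 * (n - 1 - i)) for i, c in enumerate(seq))
-- ===== Notes on version B (the rewrite author's own statement) =====
-- stated objective: alternative
-- what changed: Replaces Horner's rolling shift-accumulate with explicit positional weighting: the length is computed up front and each character contributes ord(c) << (8*(n-1-i)) in one summed comprehension.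
import Mathlib
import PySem

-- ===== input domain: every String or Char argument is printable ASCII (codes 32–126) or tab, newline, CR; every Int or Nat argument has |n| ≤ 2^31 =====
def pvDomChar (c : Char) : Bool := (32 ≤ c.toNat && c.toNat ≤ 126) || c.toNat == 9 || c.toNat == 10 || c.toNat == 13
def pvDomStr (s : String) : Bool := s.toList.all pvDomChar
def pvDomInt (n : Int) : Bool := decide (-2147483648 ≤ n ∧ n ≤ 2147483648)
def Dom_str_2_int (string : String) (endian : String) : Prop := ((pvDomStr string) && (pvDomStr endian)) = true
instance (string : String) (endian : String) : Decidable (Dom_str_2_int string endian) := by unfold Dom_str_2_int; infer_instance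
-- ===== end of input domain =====

-- B replaces A's Horner shift-accumulate loop by explicit positional weighting
-- (length up front, each char weighted by 2^(8*(n-1-i))); same cost, different decomposition.


-- ===== PORT A =====
-- Horner loop: ret = ret << 8; ret += ord(i).  The accumulator starts at 0 and stays
-- nonnegative, so Python's `ret << 8` is exactly `ret * 2^8` (ported so).
def str_2_int (string : String) (endian : String) : Int :=
  let seq : List Char :=
    if endian = "le" then string.toList.reverse
    else string.toList          -- 'be': pass; any other endian raises (excluded by Pre_)
  seq.foldl (fun ret i => ret * 2 ^ 8 + (i.toNat : Int)) 0

-- ===== PORT B =====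
-- positional weighting: sum(ord(c) << (8*(n-1-i)) for i, c in enumerate(seq));
-- ord(c) ≥ 0, so `<<` is exactly multiplication by 2^(8*(n-1-i)).
def str_2_int_alt (string : String) (endian : String) : Int :=
  let seq : List Char :=
    if endian = "le" then string.toList.reverse
    else string.toList          -- any endian other than 'le'/'be' raises (excluded by Pre_)
  let n : Nat := seq.length
  ((PySem.List.enumerate seq 0).map
      (fun p => (p.2.toNat : Int) * 2 ^ (8 * (n - 1 - p.1.toNat)))).sum

-- ===== PRECONDITION & SPEC =====
-- A raises Exception for any endian other than 'le'/'be'; exactly those are excluded.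
def Pre_str_2_int (string : String) (endian : String) : Prop :=
  endian = "le" ∨ endian = "be"
instance (string : String) (endian : String) : Decidable (Pre_str_2_int string endian) := by
  unfold Pre_str_2_int; infer_instance

def pvWitness_str_2_int : String × String := ("ab", "le")

def Spec_str_2_int (string : String) (endian : String) (out : Int) : Prop :=
  out = str_2_int_alt string endian
instance (string : String) (endian : String) (out : Int) : Decidable (Spec_str_2_int string endian out) := by
  unfold Spec_str_2_int; infer_instance

-- ===== CLAIM (what is proved, stated in full; the proofs are below) =====
def Claim_equal_str_2_int : Prop := ∀ (string : String) (endian : String), Dom_str_2_int string endian → Pre_str_2_int string endian → Spec_str_2_int string endian (str_2_int string endian)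

-- ===== LEMMAS AND PROOFS =====

-- big-endian value of a char list, defined structurally (proof-side reference function)
def pvS : List Char → Int
  | [] => 0
  | c :: t => (c.toNat : Int) * 2 ^ (8 * t.length) + pvS t

-- A's Horner fold from accumulator a
lemma pvA_fold (l : List Char) (a : Int) :
    l.foldl (fun ret i => ret * 2 ^ 8 + (i.toNat : Int)) a
      = a * 2 ^ (8 * l.length) + pvS l := by
  induction l generalizing a with
  | nil => simp [pvS]
  | cons c t ih =>
      simp only [List.foldl_cons, ih, pvS, List.length_cons]
      have : (8 * (t.length + 1)) = 8 + 8 * t.length := by ring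
      rw [this, pow_add]
      ring

-- B's enumerated positional sum from start index s, when n is large enough
lemma pvB_sum (l : List Char) (s n : Nat) (h : s + l.length ≤ n) :
    ((PySem.List.enumerate l (s : Int)).map
        (fun p => (p.2.toNat : Int) * 2 ^ (8 * (n - 1 - p.1.toNat)))).sum
      = 2 ^ (8 * (n - s - l.length)) * pvS l := by
  induction l generalizing s with
  | nil => simp [PySem.List.enumerate_nil, pvS]
  | cons c t ih =>
      rw [PySem.List.enumerate_cons]
      simp only [List.map_cons, List.sum_cons, pvS]
      have hs : ((s : Int) + 1) = ((s + 1 : Nat) : Int) := by push_cast; ring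
      rw [hs, ih (s + 1) (by simpa [Nat.add_comm, Nat.add_left_comm] using h)]
      have h1 : (((s : Int)).toNat) = s := Int.toNat_natCast s
      rw [h1]
      have e1 : n - 1 - s = t.length + (n - s - (c :: t).length) := by
        simp only [List.length_cons] at h ⊢; omega
      have e2 : n - (s + 1) - t.length = n - s - (c :: t).length := by
        simp only [List.length_cons]; omega
      rw [e1, e2, Nat.mul_add, pow_add]
      ring

-- ===== VERDICT (by name: the statement is the Claim_ definition above) =====
theorem str_2_int_spec : Claim_equal_str_2_int := by
  intro string endian _ _
  unfold Spec_str_2_int str_2_int str_2_int_alt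
  have h := pvB_sum (if endian = "le" then string.toList.reverse else string.toList) 0
      (if endian = "le" then string.toList.reverse else string.toList).length (by simp)
  simp only [Nat.cast_zero] at h
  simp only [pvA_fold, h, Nat.sub_zero, Nat.sub_self, pow_zero, one_mul, zero_mul,
    Nat.mul_zero, zero_add]
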